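-- pv_equiv track=rewrite | github.com/pypi-data/pypi-mirror-145 | packages/amphetype/amphetype-1.2.1-py3-none-any.whl/amphetype/Text.py | popFormat
-- ===== SOURCE A (Python) =====
-- def popFormat(lst):
--   ret = []
--   p = []
--   while len(lst) > 0:
--     s = lst.pop(0)
--     if s is not None:
--       p.append(s)
--     else:
--       ret.append(' '.join(p))
--       p = []
--   if len(p) > 0:
--     ret.append(' '.join(p))
--   return '\n'.join(ret)
-- ===== SOURCE B (Python) =====
-- def popFormat(lst):
--   # Two-phase: build groups split on None, then join. Return value matches A;
--   # unlike A (which empties lst via pop), B does not mutate lst.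
--   groups = [[]]
--   for s in lst:
--     if s is None:
--       groups.append([])
--     else:
--       groups[-1].append(s)
--   parts = [' '.join(g) for g in groups[:-1]]
--   if groups[-1]:
--     parts.append(' '.join(groups[-1]))
--   return '\n'.join(parts)
-- ===== Notes on version B (the rewrite author's own statement) =====
-- stated objective: faster
-- what changed: Replaces A's destructive pop(0)-while loop that emits joined segments as it scans with a non-mutating two-phase pass: first build a list of groups split on None, then join each group and the groups with newlines.
import Mathlib
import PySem

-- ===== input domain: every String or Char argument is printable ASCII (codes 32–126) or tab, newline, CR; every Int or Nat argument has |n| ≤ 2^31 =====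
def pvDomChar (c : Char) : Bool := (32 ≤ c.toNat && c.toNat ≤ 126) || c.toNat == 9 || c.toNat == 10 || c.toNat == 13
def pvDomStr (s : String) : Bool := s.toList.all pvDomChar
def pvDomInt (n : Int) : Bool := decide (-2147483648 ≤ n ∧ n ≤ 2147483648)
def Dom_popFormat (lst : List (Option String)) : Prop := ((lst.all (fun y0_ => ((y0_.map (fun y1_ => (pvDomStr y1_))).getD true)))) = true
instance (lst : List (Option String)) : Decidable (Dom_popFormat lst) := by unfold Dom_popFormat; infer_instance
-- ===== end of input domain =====

-- B replaces A's destructive pop-while loop with a non-mutating two-phase build-groups-then-join;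
-- return-value equivalence only: A empties its argument list, B does not mutate it.


-- ===== PORT A =====
-- while len(lst) > 0: s = lst.pop(0); …  — structural recursion on lst with accumulators ret, p
def popFormatLoop (lst : List (Option String)) (ret p : List String) : String :=
  match lst with
  | [] =>
      if p.length > 0 then PySem.Str.join "\n" (ret ++ [PySem.Str.join " " p])
      else PySem.Str.join "\n" ret
  | s :: rest =>
      match s with
      | some s => popFormatLoop rest ret (p ++ [s])
      | none => popFormatLoop rest (ret ++ [PySem.Str.join " " p]) []

def popFormat (lst : List (Option String)) : String :=
  popFormatLoop lst [] []

-- ===== PORT B =====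
-- for s in lst: groups.append([]) / groups[-1].append(s)
def popFormatAltStep (groups : List (List String)) (s : Option String) : List (List String) :=
  match s with
  | none => groups ++ [[]]
  | some s => groups.dropLast ++ [groups.getLastD [] ++ [s]]

def popFormat_alt (lst : List (Option String)) : String :=
  let groups := lst.foldl popFormatAltStep [[]]
  let parts := groups.dropLast.map (fun g => PySem.Str.join " " g)
  let parts := if groups.getLastD [] ≠ [] then parts ++ [PySem.Str.join " " (groups.getLastD [])] else parts
  PySem.Str.join "\n" parts

-- ===== PRECONDITION & SPEC =====
def Spec_popFormat (lst : List (Option String)) (out : String) : Prop := out = popFormat_alt lst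
instance (lst : List (Option String)) (out : String) : Decidable (Spec_popFormat lst out) := by unfold Spec_popFormat; infer_instance

-- ===== CLAIM (what is proved, stated in full; the proofs are below) =====
def Claim_equal_popFormat : Prop := ∀ (lst : List (Option String)), Dom_popFormat lst → Spec_popFormat lst (popFormat lst)

-- ===== LEMMAS AND PROOFS =====

-- B's finishing pass, factored for the invariant
def popFormatFinish (groups : List (List String)) : String :=
  let parts := groups.dropLast.map (fun g => PySem.Str.join " " g)
  let parts := if groups.getLastD [] ≠ [] then parts ++ [PySem.Str.join " " (groups.getLastD [])] else parts
  PySem.Str.join "\n" parts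

theorem popFormat_invariant (lst : List (Option String)) :
    ∀ (gs : List (List String)) (cur : List String),
      popFormatLoop lst (gs.map (fun g => PySem.Str.join " " g)) cur
        = popFormatFinish (lst.foldl popFormatAltStep (gs ++ [cur])) := by
  induction lst with
  | nil =>
      intro gs cur
      simp [popFormatLoop, popFormatFinish]
      rcases cur with _ | ⟨c, cs⟩ <;> simp
  | cons s rest ih =>
      intro gs cur
      match s with
      | some s =>
          simpa [popFormatLoop, popFormatAltStep, List.getLastD_concat]
            using ih gs (cur ++ [s])
      | none =>
          have := ih (gs ++ [cur]) []
          simpa [popFormatLoop, popFormatAltStep, List.map_append] using this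

-- ===== VERDICT (by name: the statement is the Claim_ definition above) =====
theorem popFormat_spec : Claim_equal_popFormat := by
  intro lst _
  show popFormat lst = popFormat_alt lst
  have := popFormat_invariant lst [] []
  simpa [popFormat, popFormat_alt, popFormatFinish] using this
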